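-- pv_equiv track=rewrite | github.com/PaulEekhof/Portfolio | AI/Nova_Caster/rules.py | modular_pattern
-- ===== SOURCE A (Python) =====
-- def modular_pattern(seq, mod):
--     """
--     Check for a modular arithmetic cycle.
--     Returns a list of remainders and whether these remainders repeat cyclically.
--     """
--     if mod == 0:
--         raise ValueError("Modulus cannot be zero.")
--     remainders = [n % mod for n in seq]
--     # naive check: assume repeated cycle if the sequence of remainders in the first half equals the second half (if length even)
--     cycle_found = False
--     n = len(remainders)
--     for cycle_length in range(1, n//2 + 1):
--         cycle_candidate = remainders[:cycle_length]
--         repeated = True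
--         for i in range(n):
--             if remainders[i] != cycle_candidate[i % cycle_length]:
--                 repeated = False
--                 break
--         if repeated:
--             cycle_found = True
--             return cycle_candidate, True
--     return remainders, cycle_found
-- ===== SOURCE B (Python) =====
-- def modular_pattern(seq, mod):
--     """
--     Check for a modular arithmetic cycle.
--     Returns a list of remainders and whether these remainders repeat cyclically.
--     """
--     if mod == 0:
--         raise ValueError("Modulus cannot be zero.")
--     rem = [x % mod for x in seq]
--     n = len(rem)
--     if n == 0:
--         return rem, False
--     # KMP failure function: fail[i] = length of the longest proper border of rem[:i+1]
--     fail = [0]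
--     for i in range(1, n):
--         k = fail[i - 1]
--         while k != 0 and rem[i] != rem[k]:
--             k = fail[k - 1]
--         fail.append(k + 1 if rem[i] == rem[k] else 0)
--     # smallest period of rem; a cycle in A's sense exists iff it fits in the first half
--     p = n - fail[n - 1]
--     if 2 * p <= n:
--         return rem[:p], True
--     return rem, False
-- ===== Notes on version B (the rewrite author's own statement) =====
-- stated objective: faster
-- what changed: A tries every candidate cycle length 1..n//2 and verifies each with a full O(n) scan; B computes the KMP failure function of the remainder list in one linear pass, reads the smallest period off as p = n - fail[n-1], and only checks 2*p <= n.
import Mathlib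
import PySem

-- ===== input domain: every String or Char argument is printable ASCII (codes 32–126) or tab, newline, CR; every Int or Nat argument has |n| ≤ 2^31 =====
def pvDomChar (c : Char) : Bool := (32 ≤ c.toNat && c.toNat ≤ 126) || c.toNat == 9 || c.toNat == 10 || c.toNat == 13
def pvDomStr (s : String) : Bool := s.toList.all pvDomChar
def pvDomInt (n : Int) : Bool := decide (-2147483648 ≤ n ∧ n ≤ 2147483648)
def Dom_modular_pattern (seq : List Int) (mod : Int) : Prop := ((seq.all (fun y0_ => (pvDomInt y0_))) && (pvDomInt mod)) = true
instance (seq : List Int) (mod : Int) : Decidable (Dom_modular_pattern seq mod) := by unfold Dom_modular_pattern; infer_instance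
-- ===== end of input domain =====

-- B replaces A's O(n^2) scan over all candidate cycle lengths by the KMP failure function:
-- the smallest period is n - fail[n-1], computed in one linear pass (asymptotically different algorithm).

-- ===== PORT A =====
-- outer loop over cycle_length = 1 .. n//2; all list indices in A are provably in range, so List.getD is exact
def pvLoopA (s : List Int) : List Nat → List Int × Bool
  | [] => (s, false)
  | p :: ps =>
      let cand := s.take p          -- remainders[:cycle_length]
      if (List.range s.length).all (fun i => s.getD i 0 == cand.getD (i % p) 0)  -- inner for-loop with early break
      then (cand, true)
      else pvLoopA s ps

def modular_pattern (seq : List Int) (mod : Int) : List Int × Bool :=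
  let remainders := seq.map (fun x => PySem.Int.mod x mod)
  pvLoopA remainders (List.range' 1 (remainders.length / 2))  -- range(1, n//2 + 1)

-- ===== PORT B =====
-- the 'while k != 0 and rem[i] != rem[k]: k = fail[k-1]' loop; fuel k+1 suffices because
-- fail[j] ≤ j for every entry actually built, so k strictly decreases (fuel only makes it total)
def pvKmpWhile (rem : List Int) (fail : List Nat) (x : Int) : Nat → Nat → Nat
  | 0, k => k
  | fuel + 1, k =>
      if k ≠ 0 ∧ rem.getD k 0 ≠ x then pvKmpWhile rem fail x fuel (fail.getD (k - 1) 0) else k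

-- the body of the 'for i in range(1, n)' loop: one while + one append
def pvFailStep (rem : List Int) (fail : List Nat) (i : Nat) : List Nat :=
  let k0 := fail.getD (i - 1) 0
  let k := pvKmpWhile rem fail (rem.getD i 0) (k0 + 1) k0
  fail ++ [if rem.getD i 0 = rem.getD k 0 then k + 1 else 0]

def pvBuildFail (rem : List Int) : List Nat :=
  (List.range' 1 (rem.length - 1)).foldl (pvFailStep rem) [0]

def modular_pattern_alt (seq : List Int) (mod : Int) : List Int × Bool :=
  let rem := seq.map (fun x => PySem.Int.mod x mod)
  let n := rem.length
  if n = 0 then (rem, false)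
  else
    let fail := pvBuildFail rem
    let p := n - fail.getD (n - 1) 0
    if 2 * p ≤ n then (rem.take p, true) else (rem, false)

-- ===== PRECONDITION & SPEC =====
-- Pre_ excludes exactly mod = 0, on which the Python A raises ValueError.
def Pre_modular_pattern (seq : List Int) (mod : Int) : Prop := mod ≠ 0
instance (seq : List Int) (mod : Int) : Decidable (Pre_modular_pattern seq mod) := by unfold Pre_modular_pattern; infer_instance
def pvWitness_modular_pattern : List Int × Int := ([3, 8, 3, 8, 3, 8], 5)

def Spec_modular_pattern (seq : List Int) (mod : Int) (out : List Int × Bool) : Prop := out = modular_pattern_alt seq mod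
instance (seq : List Int) (mod : Int) (out : List Int × Bool) : Decidable (Spec_modular_pattern seq mod out) := by unfold Spec_modular_pattern; infer_instance

-- ===== CLAIM (what is proved, stated in full; the proofs are below) =====
def Claim_equal_modular_pattern : Prop := ∀ (seq : List Int) (mod : Int), Dom_modular_pattern seq mod → Pre_modular_pattern seq mod → Spec_modular_pattern seq mod (modular_pattern seq mod)

-- ===== LEMMAS AND PROOFS =====

-- k is a border of the prefix of length m of s (pointwise, bound-free via getD)
def Bord (s : List Int) (m k : Nat) : Prop := k ≤ m ∧ ∀ j, j < k → s.getD j 0 = s.getD (m - k + j) 0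

-- k is THE longest proper border of the prefix of length m
def MB (s : List Int) (m k : Nat) : Prop :=
  k < m ∧ Bord s m k ∧ ∀ j, j < m → Bord s m j → j ≤ k

lemma bord_zero (s : List Int) (m : Nat) : Bord s m 0 :=
  ⟨Nat.zero_le _, fun j hj => absurd hj (Nat.not_lt_zero j)⟩

lemma bord_ext (s : List Int) (m k : Nat) (hb : Bord s m k) (hk : k ≤ m)
    (hx : s.getD m 0 = s.getD k 0) : Bord s (m + 1) (k + 1) := by
  refine ⟨by omega, fun j hj => ?_⟩
  rcases Nat.lt_succ_iff_lt_or_eq.mp hj with h | h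
  · have := hb.2 j h
    have e : m + 1 - (k + 1) + j = m - k + j := by omega
    rwa [e]
  · rw [h]
    have e : m + 1 - (k + 1) + k = m := by omega
    rw [e]; exact hx.symm

lemma bord_unext (s : List Int) (m k : Nat) (hb : Bord s (m + 1) (k + 1)) :
    Bord s m k ∧ s.getD m 0 = s.getD k 0 := by
  obtain ⟨hk, h⟩ := hb
  refine ⟨⟨by omega, fun j hj => ?_⟩, ?_⟩
  · have := h j (by omega)
    have e : m + 1 - (k + 1) + j = m - k + j := by omega
    rwa [e] at this
  · have := h k (by omega)
    have e : m + 1 - (k + 1) + k = m := by omega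
    rw [e] at this; exact this.symm

lemma bord_trans (s : List Int) (m k j : Nat) (h1 : Bord s m k) (h2 : Bord s k j) :
    Bord s m j := by
  obtain ⟨hk, h1⟩ := h1
  obtain ⟨hj, h2⟩ := h2
  refine ⟨by omega, fun t ht => ?_⟩
  rw [h2 t ht]
  have := h1 (k - j + t) (by omega)
  have e : m - k + (k - j + t) = m - j + t := by omega
  rwa [e] at this

-- two borders of the same prefix: the smaller is a border of the larger
lemma bord_chain (s : List Int) (m a b : Nat) (ha : Bord s m a) (hb : Bord s m b)
    (hab : a ≤ b) : Bord s b a := by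
  obtain ⟨ham, ha⟩ := ha
  obtain ⟨hbm, hb⟩ := hb
  refine ⟨hab, fun t ht => ?_⟩
  rw [ha t ht]
  have := hb (b - a + t) (by omega)
  have e : m - b + (b - a + t) = m - a + t := by omega
  rw [e] at this
  exact this.symm

-- spec of the while loop: starting from the longest border k of prefix m (among those of interest),
-- with the fail table correct below, it returns the longest border K of prefix m with s[K] = x, or 0
lemma kmpWhile_spec (s : List Int) (F : List Nat) (x : Int)
    (hF : ∀ i, i < F.length → MB s (i + 1) (F.getD i 0)) (m : Nat) :
    ∀ fuel k, k + 1 ≤ fuel → k < m → k ≤ F.length → Bord s m k →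
    (∀ k', k' < m → Bord s m k' → s.getD k' 0 = x → k' ≤ k) →
    (pvKmpWhile s F x fuel k < m ∧ Bord s m (pvKmpWhile s F x fuel k) ∧
     (∀ k', k' < m → Bord s m k' → s.getD k' 0 = x → k' ≤ pvKmpWhile s F x fuel k) ∧
     (pvKmpWhile s F x fuel k = 0 ∨ s.getD (pvKmpWhile s F x fuel k) 0 = x)) := by
  intro fuel
  induction fuel with
  | zero => intro k hfuel; omega
  | succ fuel ih =>
      intro k hfuel hkm hkF hb hmax
      by_cases hc : k ≠ 0 ∧ s.getD k 0 ≠ x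
      · have hunf : pvKmpWhile s F x (fuel + 1) k =
            if k ≠ 0 ∧ s.getD k 0 ≠ x then pvKmpWhile s F x fuel (F.getD (k - 1) 0) else k := rfl
        have step : pvKmpWhile s F x (fuel + 1) k = pvKmpWhile s F x fuel (F.getD (k - 1) 0) := by
          rw [hunf, if_pos hc]
        obtain ⟨hk0, hkx⟩ := hc
        have hkF' : k - 1 < F.length := by omega
        have hMB := hF (k - 1) hkF'
        have ek : k - 1 + 1 = k := by omega
        rw [ek] at hMB
        obtain ⟨hlt, hbord, hmaxF⟩ := hMB
        set k1 := F.getD (k - 1) 0 with hk1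
        have hb1 : Bord s m k1 := bord_trans s m k k1 hb hbord
        have hmax1 : ∀ k', k' < m → Bord s m k' → s.getD k' 0 = x → k' ≤ k1 := by
          intro k' hk'm hb' hx'
          have hk'k : k' ≤ k := hmax k' hk'm hb' hx'
          have hne : k' ≠ k := fun h => hkx (h ▸ hx')
          exact hmaxF k' (by omega) (bord_chain s m k' k hb' hb hk'k)
        rw [step]
        exact ih k1 (by omega) (by omega) (by omega) hb1 hmax1
      · have hunf : pvKmpWhile s F x (fuel + 1) k =
            if k ≠ 0 ∧ s.getD k 0 ≠ x then pvKmpWhile s F x fuel (F.getD (k - 1) 0) else k := rfl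
        have step : pvKmpWhile s F x (fuel + 1) k = k := by
          rw [hunf, if_neg hc]
        rw [step]
        refine ⟨hkm, hb, hmax, ?_⟩
        by_cases h0 : k = 0
        · exact Or.inl h0
        · right
          by_contra hx
          exact hc ⟨h0, hx⟩

-- one step of the outer loop preserves the invariant
lemma build_step (s : List Int) (F : List Nat)
    (hF : ∀ i, i < F.length → MB s (i + 1) (F.getD i 0)) (hlen : 1 ≤ F.length) :
    let m := F.length
    let k0 := F.getD (m - 1) 0
    let K := pvKmpWhile s F (s.getD m 0) (k0 + 1) k0
    MB s (m + 1) (if s.getD m 0 = s.getD K 0 then K + 1 else 0) := by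
  intro m k0 K
  have hMB0 := hF (m - 1) (by omega)
  have em : m - 1 + 1 = m := by omega
  rw [em] at hMB0
  obtain ⟨hk0m, hb0, hmax0⟩ := hMB0
  have hspec := kmpWhile_spec s F (s.getD m 0) hF m (k0 + 1) k0 (le_refl _) hk0m
      (by omega) hb0 (fun k' h1 h2 _ => hmax0 k' h1 h2)
  obtain ⟨hKm, hKb, hKmax, hexit⟩ := hspec
  by_cases hmatch : s.getD m 0 = s.getD K 0
  · rw [if_pos hmatch]
    refine ⟨by omega, bord_ext s m K hKb (by omega) hmatch, ?_⟩
    intro j hj hbj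
    rcases Nat.eq_zero_or_pos j with h0 | hpos
    · omega
    · obtain ⟨c, rfl⟩ : ∃ c, j = c + 1 := ⟨j - 1, by omega⟩
      obtain ⟨hbc, hxc⟩ := bord_unext s m c hbj
      have := hKmax c (by omega) hbc hxc.symm
      omega
  · rw [if_neg hmatch]
    refine ⟨by omega, bord_zero s (m + 1), ?_⟩
    intro j hj hbj
    rcases Nat.eq_zero_or_pos j with h0 | hpos
    · omega
    · obtain ⟨c, rfl⟩ : ∃ c, j = c + 1 := ⟨j - 1, by omega⟩
      obtain ⟨hbc, hxc⟩ := bord_unext s m c hbj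
      have hcK : c ≤ K := hKmax c (by omega) hbc hxc.symm
      have hK0 : K = 0 := by
        rcases hexit with h | h
        · exact h
        · exact absurd h.symm hmatch
      exfalso
      have hc0 : c = 0 := by omega
      exact hmatch (by rw [hK0, ← hc0]; exact hxc)

-- invariant through the whole fold
lemma build_inv (s : List Int) : ∀ (cnt : Nat) (F : List Nat), 1 ≤ F.length →
    (∀ i, i < F.length → MB s (i + 1) (F.getD i 0)) →
    ((List.range' F.length cnt).foldl (pvFailStep s) F).length = F.length + cnt ∧
    ∀ i, i < ((List.range' F.length cnt).foldl (pvFailStep s) F).length →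
      MB s (i + 1) (((List.range' F.length cnt).foldl (pvFailStep s) F).getD i 0) := by
  intro cnt
  induction cnt with
  | zero => intro F h1 hF; simp only [List.range'_zero, List.foldl_nil]; exact ⟨by omega, hF⟩
  | succ cnt ih =>
      intro F h1 hF
      rw [List.range'_succ, List.foldl_cons]
      have hstep := build_step s F hF h1
      set e := (if s.getD F.length 0 = s.getD (pvKmpWhile s F (s.getD F.length 0)
        (F.getD (F.length - 1) 0 + 1) (F.getD (F.length - 1) 0)) 0
        then pvKmpWhile s F (s.getD F.length 0) (F.getD (F.length - 1) 0 + 1)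
          (F.getD (F.length - 1) 0) + 1 else 0) with he
      have hF' : ∀ i, i < (F ++ [e]).length → MB s (i + 1) ((F ++ [e]).getD i 0) := by
        intro i hi
        simp only [List.length_append, List.length_cons, List.length_nil] at hi
        by_cases hiF : i < F.length
        · rw [List.getD_eq_getElem?_getD, List.getElem?_append_left hiF,
            ← List.getD_eq_getElem?_getD]
          exact hF i hiF
        · have : i = F.length := by omega
          subst this
          rw [List.getD_eq_getElem?_getD, List.getElem?_append_right (le_refl _)]
          simpa using hstep
      have hrec := ih (F ++ [e]) (by simp) hF'
      have hseed : pvFailStep s F F.length = F ++ [e] := rfl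
      have hlen : (F ++ [e]).length = F.length + 1 := by simp
      rw [hlen] at hrec
      rw [hseed]
      exact ⟨by have := hrec.1; omega, hrec.2⟩

-- A-side: pointwise characterisation of the inner check
lemma getD_take_lt (s : List Int) (p j : Nat) (hj : j < p) :
    (s.take p).getD j 0 = s.getD j 0 := by
  simp [List.getD_eq_getElem?_getD, List.getElem?_take_of_lt hj]

lemma condA_iff (s : List Int) (p : Nat) (hp : 1 ≤ p) :
    ((List.range s.length).all (fun i => s.getD i 0 == (s.take p).getD (i % p) 0) = true)
    ↔ (∀ i, i < s.length → s.getD i 0 = s.getD (i % p) 0) := by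
  simp only [List.all_eq_true, List.mem_range, beq_iff_eq]
  constructor
  · intro h i hi
    have := h i hi
    rwa [getD_take_lt s p _ (Nat.mod_lt _ hp)] at this
  · intro h i hi
    rw [getD_take_lt s p _ (Nat.mod_lt _ hp)]
    exact h i hi

-- A's condition at shift p ↔ (n - p) is a border, for 1 ≤ p ≤ n
lemma condA_iff_bord (s : List Int) (p : Nat) (hp : 1 ≤ p) (hpn : p ≤ s.length) :
    ((List.range s.length).all (fun i => s.getD i 0 == (s.take p).getD (i % p) 0) = true)
    ↔ Bord s s.length (s.length - p) := by
  rw [condA_iff s p hp]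
  constructor
  · intro h
    refine ⟨by omega, fun j hj => ?_⟩
    have e : s.length - (s.length - p) + j = p + j := by omega
    rw [e, h (p + j) (by omega), h j (by omega), Nat.add_mod_left]
  · intro hB i
    obtain ⟨-, hb⟩ := hB
    induction i using Nat.strong_induction_on with
    | _ i ih =>
      intro hi
      by_cases hip : i < p
      · rw [Nat.mod_eq_of_lt hip]
      · have hpi : p ≤ i := by omega
        have hlt : i - p < s.length - p := by omega
        have hstep := hb (i - p) hlt
        have e : s.length - (s.length - p) + (i - p) = i := by omega
        rw [e] at hstep
        calc s.getD i 0 = s.getD (i - p) 0 := hstep.symm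
          _ = s.getD ((i - p) % p) 0 := ih (i - p) (by omega) (by omega)
          _ = s.getD (i % p) 0 := by rw [← Nat.mod_eq_sub_mod hpi]

-- the first-match behaviour of A's outer loop
lemma loopA_none (s : List Int) (ps : List Nat)
    (h : ∀ p ∈ ps, ¬ ((List.range s.length).all (fun i => s.getD i 0 == (s.take p).getD (i % p) 0) = true)) :
    pvLoopA s ps = (s, false) := by
  induction ps with
  | nil => rfl
  | cons p ps ih =>
      simp only [pvLoopA]
      rw [if_neg (h p (List.mem_cons_self ..)), ih (fun q hq => h q (List.mem_cons_of_mem _ hq))]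

lemma loopA_first (s : List Int) (pstar : Nat)
    (hcond : (List.range s.length).all (fun i => s.getD i 0 == (s.take pstar).getD (i % pstar) 0) = true)
    (hmin : ∀ q, 1 ≤ q → q < pstar → ¬ ((List.range s.length).all (fun i => s.getD i 0 == (s.take q).getD (i % q) 0) = true)) :
    ∀ cnt a, 1 ≤ a → a ≤ pstar → pstar < a + cnt →
    pvLoopA s (List.range' a cnt) = (s.take pstar, true) := by
  intro cnt
  induction cnt with
  | zero => intro a _ _ _; omega
  | succ cnt ih =>
      intro a ha hap hpa
      rw [List.range'_succ]
      simp only [pvLoopA]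
      by_cases h : a = pstar
      · subst h; rw [if_pos hcond]
      · rw [if_neg (hmin a ha (by omega))]
        exact ih (a + 1) (by omega) (by omega) (by omega)

-- main equivalence on the remainder list
lemma main_eq (s : List Int) :
    pvLoopA s (List.range' 1 (s.length / 2)) =
    (if s.length = 0 then (s, false)
     else
       let fail := pvBuildFail s
       let p := s.length - fail.getD (s.length - 1) 0
       if 2 * p ≤ s.length then (s.take p, true) else (s, false)) := by
  by_cases hn : s.length = 0
  · rw [if_pos hn]
    have h2 : s.length / 2 = 0 := by omega
    rw [h2]
    rfl
  · rw [if_neg hn]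
    have hn1 : 1 ≤ s.length := by omega
    have hinit : ∀ i, i < ([0] : List Nat).length → MB s (i + 1) (([0] : List Nat).getD i 0) := by
      intro i hi
      simp only [List.length_cons, List.length_nil] at hi
      have hi0 : i = 0 := by omega
      subst hi0
      simp only [List.getD_cons_zero]
      exact ⟨Nat.one_pos, bord_zero s 1, fun j hj _ => by omega⟩
    have hinv := build_inv s (s.length - 1) [0] (by simp) hinit
    have hlen1 : ([0] : List Nat).length = 1 := rfl
    rw [hlen1] at hinv
    obtain ⟨hlen, hMB⟩ := hinv
    have hbf : pvBuildFail s = (List.range' 1 (s.length - 1)).foldl (pvFailStep s) [0] := rfl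
    set R := (List.range' 1 (s.length - 1)).foldl (pvFailStep s) [0] with hRdef
    have hRlen : R.length = s.length := by omega
    have hMBn := hMB (s.length - 1) (by omega)
    have e : s.length - 1 + 1 = s.length := by omega
    rw [e] at hMBn
    set kstar := R.getD (s.length - 1) 0 with hk
    obtain ⟨hkn, hkb, hkmax⟩ := hMBn
    set pstar := s.length - kstar with hp
    have hps1 : 1 ≤ pstar := by omega
    have hpsn : pstar ≤ s.length := by omega
    have hcond : (List.range s.length).all
        (fun i => s.getD i 0 == (s.take pstar).getD (i % pstar) 0) = true := by
      rw [condA_iff_bord s pstar hps1 hpsn]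
      have he2 : s.length - pstar = kstar := by omega
      rwa [he2]
    have hmin : ∀ q, 1 ≤ q → q < pstar →
        ¬ ((List.range s.length).all (fun i => s.getD i 0 == (s.take q).getD (i % q) 0) = true) := by
      intro q hq1 hqp hc
      rw [condA_iff_bord s q hq1 (by omega)] at hc
      have := hkmax (s.length - q) (by omega) hc
      omega
    show pvLoopA s (List.range' 1 (s.length / 2)) =
      (if 2 * (s.length - (pvBuildFail s).getD (s.length - 1) 0) ≤ s.length
       then (s.take (s.length - (pvBuildFail s).getD (s.length - 1) 0), true) else (s, false))
    rw [hbf, ← hk, ← hp]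
    by_cases hhalf : 2 * pstar ≤ s.length
    · rw [if_pos hhalf]
      exact loopA_first s pstar hcond hmin (s.length / 2) 1 (le_refl _) (by omega) (by omega)
    · rw [if_neg hhalf]
      apply loopA_none
      intro p hpmem hc
      have hmem := List.mem_range'_1.mp hpmem
      have hp1 : 1 ≤ p := hmem.1
      have hp2 : p < 1 + s.length / 2 := hmem.2
      have hple : p ≤ s.length := by omega
      rw [condA_iff_bord s p hp1 hple] at hc
      have := hkmax (s.length - p) (by omega) hc
      omega

-- ===== VERDICT (by name: the statement is the Claim_ definition above) =====
theorem modular_pattern_spec : Claim_equal_modular_pattern := by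
  intro seq mod _ _
  unfold Spec_modular_pattern modular_pattern modular_pattern_alt
  exact main_eq (seq.map (fun x => PySem.Int.mod x mod))
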